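-- pv_equiv track=rewrite | github.com/DarkAlexWang/leetcode | Interview/k_distinct_character-2.py | most_k_chars
-- ===== SOURCE A (Python) =====
-- import collections
--
-- def most_k_chars(s, k):
--     if len(s) == 0:
--         return 0
--     table = collections.defaultdict(int)
--     num, left = 0, 0
--     for i in range(len(s)):
--         table[s[i]] += 1
--         while len(table) > k:
--             table[s[left]] -= 1
--             if table[s[left]] == 0:
--                 del table[s[left]]
--             left += 1
--         num += i - left + 1
--     return num
-- ===== SOURCE B (Python) =====
-- def most_k_chars(s, k):
--     # Brute force: for each end index j, scan start index backward, counting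
--     # substrings ending at j whose distinct-character count stays <= k.
--     num = 0
--     for j in range(len(s)):
--         seen = set()
--         for i in range(j, -1, -1):
--             seen.add(s[i])
--             if len(seen) <= k:
--                 num += 1
--             else:
--                 break
--     return num
-- ===== Notes on version B (the rewrite author's own statement) =====
-- stated objective: alternative
-- what changed: Replaced the sliding-window algorithm (defaultdict character counter plus a moving left pointer) by a brute-force scan: for each end index, walk backward accumulating a fresh set of seen characters and count while it has at most k distinct, breaking as soon as it exceeds k.
import Mathlib
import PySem

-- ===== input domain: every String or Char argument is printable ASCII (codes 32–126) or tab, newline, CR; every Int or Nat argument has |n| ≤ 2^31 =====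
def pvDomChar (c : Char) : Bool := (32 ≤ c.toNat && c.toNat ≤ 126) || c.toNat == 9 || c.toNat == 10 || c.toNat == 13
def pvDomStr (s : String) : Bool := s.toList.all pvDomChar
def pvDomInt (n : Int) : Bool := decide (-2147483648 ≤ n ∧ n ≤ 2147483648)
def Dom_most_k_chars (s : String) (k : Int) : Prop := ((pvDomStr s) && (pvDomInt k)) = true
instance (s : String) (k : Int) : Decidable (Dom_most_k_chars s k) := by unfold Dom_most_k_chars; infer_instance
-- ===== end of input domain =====

-- B replaces the sliding window (hash-count table, moving left pointer) by a brute-force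
-- backward scan from each end index with a fresh set, breaking once distinct chars exceed k;
-- objective: alternative (simpler structure, not faster).


-- ===== PORT A =====
-- the 'while len(table) > k:' loop; on exhausted string (only reachable when k < 0,
-- where Python raises IndexError, outside Pre_) it stops.
def aShrink (cs : List Char) (k : Int) (table : PySem.Dict Char Int) (left : Nat) :
    PySem.Dict Char Int × Nat :=
  if (table.size : Int) > k then
    match h : PySem.List.pyGet? cs (left : Int) with
    | none => (table, left)   -- Python raises IndexError here (excluded by Pre_)
    | some c =>
      let t := table.insert c (table.getD c 0 - 1)
      let t' := if t.getD c 0 = 0 then t.erase c else t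
      aShrink cs k t' (left + 1)
  else (table, left)
termination_by cs.length - left
decreasing_by
  have hlt : left < cs.length := by
    rw [PySem.List.pyGet?_natCast] at h
    exact (List.getElem?_eq_some_iff.mp h).1
  omega

def most_k_chars (s : String) (k : Int) : Int :=
  let cs := s.toList
  if PySem.Str.len s = 0 then 0
  else
    let res := cs.zipIdx.foldl
      (fun (st : PySem.Dict Char Int × Nat × Int) (ci : Char × Nat) =>
        let t := st.1.insert ci.1 (st.1.getD ci.1 0 + 1)
        let p := aShrink cs k t st.2.1
        (p.1, p.2, st.2.2 + ((ci.2 : Int) - (p.2 : Int) + 1)))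
      (PySem.Dict.empty, 0, 0)
    res.2.2

-- ===== PORT B =====
-- inner loop 'for i in range(j, -1, -1): seen.add(s[i]); if len(seen) <= k: num += 1 else: break',
-- running over the reversed prefix s[0..j]
def bInner (k : Int) : List Char → PySem.Set Char → Int
  | [], _ => 0
  | c :: rest, seen =>
    let seen' := PySem.Set.add seen c
    if ((seen'.length : Int)) ≤ k then 1 + bInner k rest seen' else 0

def most_k_chars_alt (s : String) (k : Int) : Int :=
  let cs := s.toList
  (List.range cs.length).foldl
    (fun num j => num + bInner k ((cs.take (j+1)).reverse) PySem.Set.empty) 0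

-- ===== PRECONDITION & SPEC =====
-- Pre_ excludes k < 0 with a nonempty string: there A's window loop walks 'left' off the
-- end of the string and raises IndexError (on the empty string A returns 0 for every k).
def Pre_most_k_chars (s : String) (k : Int) : Prop := 0 ≤ k ∨ s = ""
instance (s : String) (k : Int) : Decidable (Pre_most_k_chars s k) := by
  unfold Pre_most_k_chars; infer_instance

def pvWitness_most_k_chars : String × Int := ("abcba", 2)

def Spec_most_k_chars (s : String) (k : Int) (out : Int) : Prop := out = most_k_chars_alt s k
instance (s : String) (k : Int) (out : Int) : Decidable (Spec_most_k_chars s k out) := by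
  unfold Spec_most_k_chars; infer_instance

-- ===== CLAIM (what is proved, stated in full; the proofs are below) =====
def Claim_equal_most_k_chars : Prop := ∀ (s : String) (k : Int), Dom_most_k_chars s k →
  Pre_most_k_chars s k → Spec_most_k_chars s k (most_k_chars s k)

-- ===== LEMMAS AND PROOFS =====

-- the character segment s[l:j] and its number of distinct characters
def pvSeg (cs : List Char) (l j : Nat) : List Char := (cs.take j).drop l
def pvDc (cs : List Char) (l j : Nat) : Nat := (pvSeg cs l j).toFinset.card

-- table t is the character counter of xs (keys exactly the chars of xs, values the counts)
def pvDInv (t : PySem.Dict Char Int) (xs : List Char) : Prop :=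
  (∀ c, t.getD c 0 = (xs.count c : Int)) ∧ t.keys.Nodup ∧ (∀ c, c ∈ t.keys ↔ c ∈ xs)

-- B's contribution for end index j
def pvBterm (cs : List Char) (k : Int) (j : Nat) : Int :=
  bInner k ((cs.take (j+1)).reverse) PySem.Set.empty

-- A's loop invariant after processing the first m characters
def pvWInv (cs : List Char) (k : Int) (m : Nat)
    (st : PySem.Dict Char Int × Nat × Int) : Prop :=
  st.2.1 ≤ m ∧ pvDInv st.1 (pvSeg cs st.2.1 m) ∧
  ((pvDc cs st.2.1 m : Int) ≤ k) ∧ (∀ l < st.2.1, (pvDc cs l m : Int) > k) ∧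
  st.2.2 = ((List.range m).map (pvBterm cs k)).sum

lemma pvSeg_cons (cs : List Char) (l m : Nat) (hl : l < m) (hm : m ≤ cs.length) :
    pvSeg cs l m = cs[l]'(by omega) :: pvSeg cs (l+1) m := by
  unfold pvSeg
  rw [List.drop_eq_getElem_cons (by simp [Nat.min_eq_left hm]; omega)]
  simp [List.getElem_take]

lemma pvSeg_succ (cs : List Char) (l m : Nat) (hl : l ≤ m) (hm : m < cs.length) :
    pvSeg cs l (m+1) = pvSeg cs l m ++ [cs[m]] := by
  unfold pvSeg
  have h1 : List.take (m+1) cs = List.take m cs ++ [cs[m]] := by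
    rw [List.take_add_one, List.getElem?_eq_getElem hm]
    rfl
  rw [h1, List.drop_append_of_le_length (by simp [Nat.min_eq_left (le_of_lt hm)]; omega)]

lemma pvDc_mono_left (cs : List Char) (l l' m : Nat) (h : l ≤ l') :
    pvDc cs l' m ≤ pvDc cs l m := by
  apply Finset.card_le_card
  intro x hx
  rw [List.mem_toFinset] at hx ⊢
  have hsub : pvSeg cs l' m = (pvSeg cs l m).drop (l' - l) := by
    unfold pvSeg
    rw [List.drop_drop]
    congr 1
    omega
  rw [hsub] at hx
  exact List.mem_of_mem_drop hx

lemma pvDc_mono_right (cs : List Char) (l m : Nat) (hl : l ≤ m) (hm : m < cs.length) :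
    pvDc cs l m ≤ pvDc cs l (m+1) := by
  apply Finset.card_le_card
  rw [pvSeg_succ cs l m hl hm]
  intro x hx
  simp only [List.mem_toFinset] at *
  exact List.mem_append_left _ hx

-- ---- dictionary lemmas (erase; no erase lemmas ship with PySem) ----
lemma pvFind?_filter_ne {ν : Type} (l : List (Char × ν)) (c c' : Char) (h : c' ≠ c) :
    (l.filter (fun p => !(p.1 == c))).find? (fun p => p.1 == c') = l.find? (fun p => p.1 == c') := by
  induction l with
  | nil => rfl
  | cons p rest ih =>
    rcases eq_or_ne p.1 c with hc | hc
    · have hpc : (p.1 == c') = false := by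
        rw [hc]; exact beq_eq_false_iff_ne.mpr (fun hh => h hh.symm)
      rw [List.filter_cons_of_neg (by simp [hc]), ih, List.find?_cons_of_neg (by simp [hpc])]
    · rw [List.filter_cons_of_pos (by simp [hc])]
      by_cases hc' : p.1 = c'
      · rw [List.find?_cons_of_pos (by simp [hc']), List.find?_cons_of_pos (by simp [hc'])]
      · rw [List.find?_cons_of_neg (by simp [hc']), List.find?_cons_of_neg (by simp [hc']), ih]

lemma pvGetD_erase_self (d : PySem.Dict Char Int) (c : Char) (v : Int) :
    (d.erase c).getD c v = v := by
  simp only [PySem.Dict.erase, PySem.Dict.getD, PySem.Dict.get?]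
  have : (d.items.filter (fun p => !(p.1 == c))).find? (fun p => p.1 == c) = none := by
    rw [List.find?_eq_none]
    intro p hp
    have := (List.mem_filter.mp hp).2
    simpa using this
  simp [this]

lemma pvGetD_erase_ne (d : PySem.Dict Char Int) (c c' : Char) (v : Int) (h : c' ≠ c) :
    (d.erase c).getD c' v = d.getD c' v := by
  simp only [PySem.Dict.erase, PySem.Dict.getD, PySem.Dict.get?]
  rw [pvFind?_filter_ne d.items c c' h]

lemma pvMem_keys_erase (d : PySem.Dict Char Int) (c c' : Char) :
    c' ∈ (d.erase c).keys ↔ c' ∈ d.keys ∧ c' ≠ c := by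
  simp only [PySem.Dict.erase, PySem.Dict.keys, List.mem_map, List.mem_filter]
  constructor
  · rintro ⟨p, ⟨hp, hne⟩, rfl⟩
    exact ⟨⟨p, hp, rfl⟩, by simpa using hne⟩
  · rintro ⟨⟨p, hp, rfl⟩, hne⟩
    exact ⟨p, ⟨hp, by simpa using hne⟩, rfl⟩

lemma pvNodup_keys_erase (d : PySem.Dict Char Int) (c : Char) (h : d.keys.Nodup) :
    (d.erase c).keys.Nodup := by
  simp only [PySem.Dict.erase, PySem.Dict.keys] at *
  exact h.sublist (List.Sublist.map _ List.filter_sublist)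

lemma pvNodup_keys_insert (d : PySem.Dict Char Int) (c : Char) (f : PySem.Dict Char Int → Char → Int)
    (h : d.keys.Nodup) : (d.insert c (f d c)).keys.Nodup := by
  have := PySem.Dict.nodup_keys_foldl_insert [c] f d h
  simpa using this

lemma pvMem_keys_insert (d : PySem.Dict Char Int) (c c' : Char) (v : Int) :
    c' ∈ (d.insert c v).keys ↔ c' = c ∨ c' ∈ d.keys := by
  rw [← PySem.Dict.contains_iff_mem_keys, PySem.Dict.contains_insert,
    ← PySem.Dict.contains_iff_mem_keys]
  simp

lemma pvDInv_size (t : PySem.Dict Char Int) (xs : List Char) (h : pvDInv t xs) :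
    t.size = xs.toFinset.card := by
  obtain ⟨_, hnd, hmem⟩ := h
  have hlen : t.size = t.keys.length := by
    simp [PySem.Dict.size, PySem.Dict.keys]
  have hfs : t.keys.toFinset = xs.toFinset := by
    ext c; simp [hmem c]
  rw [hlen, ← List.toFinset_card_of_nodup hnd, hfs]

lemma pvDInv_empty : pvDInv PySem.Dict.empty [] := by
  refine ⟨fun c => rfl, ?_, fun c => ?_⟩ <;> simp [PySem.Dict.empty, PySem.Dict.keys]

lemma pvDInv_append (t : PySem.Dict Char Int) (xs : List Char) (c : Char)
    (h : pvDInv t xs) : pvDInv (t.insert c (t.getD c 0 + 1)) (xs ++ [c]) := by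
  obtain ⟨hg, hnd, hmem⟩ := h
  refine ⟨fun c' => ?_, pvNodup_keys_insert t c (fun d x => d.getD x 0 + 1) hnd, fun c' => ?_⟩
  · by_cases hc : c' = c
    · subst hc
      rw [PySem.Dict.getD_insert_self, hg c']
      simp [List.count_append]
    · rw [PySem.Dict.getD_insert_of_ne (k := c) (k' := c') _ _ _ hc, hg c']
      simp [List.count_append, List.count_singleton, hc, Ne.symm hc]
  · simp [pvMem_keys_insert, List.mem_append, hmem c', or_comm]

lemma pvDInv_tail (t : PySem.Dict Char Int) (c : Char) (ys : List Char)
    (h : pvDInv t (c :: ys)) :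
    pvDInv (let t1 := t.insert c (t.getD c 0 - 1);
            if t1.getD c 0 = 0 then t1.erase c else t1) ys := by
  obtain ⟨hg, hnd, hmem⟩ := h
  have hgc : t.getD c 0 = (ys.count c : Int) + 1 := by
    rw [hg c]; simp [List.count_cons]
  have hg1self : (t.insert c (t.getD c 0 - 1)).getD c 0 = (ys.count c : Int) := by
    rw [PySem.Dict.getD_insert_self, hgc]; ring
  have hnd1 : (t.insert c (t.getD c 0 - 1)).keys.Nodup :=
    pvNodup_keys_insert t c (fun d x => d.getD x 0 - 1) hnd
  by_cases h0 : (t.insert c (t.getD c 0 - 1)).getD c 0 = 0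
  · -- count c ys = 0: the key is deleted
    have hcnt : ys.count c = 0 := by rw [hg1self] at h0; exact_mod_cast h0
    have hnotmem : c ∉ ys := List.count_eq_zero.mp hcnt
    simp only [h0, if_pos]
    refine ⟨fun c' => ?_, pvNodup_keys_erase _ c hnd1, fun c' => ?_⟩
    · by_cases hc : c' = c
      · subst hc; rw [pvGetD_erase_self]; simp [hcnt]
      · rw [pvGetD_erase_ne _ _ _ _ hc, PySem.Dict.getD_insert_of_ne (k := c) (k' := c') _ _ _ hc, hg c']
        simp [List.count_cons, hc, Ne.symm hc]
    · rw [pvMem_keys_erase, pvMem_keys_insert]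
      constructor
      · rintro ⟨hm, hne⟩
        rcases hm with rfl | hm
        · exact absurd rfl hne
        · have := (hmem c').mp hm
          simpa [hne] using this
      · intro hm
        have hne : c' ≠ c := by rintro rfl; exact hnotmem hm
        exact ⟨Or.inr ((hmem c').mpr (by simp [hm])), hne⟩
  · -- count c ys > 0: the key stays
    have hcnt : ys.count c ≠ 0 := by
      intro hc; rw [hg1self] at h0; exact h0 (by exact_mod_cast hc)
    simp only [h0, if_neg, not_false_iff]
    refine ⟨fun c' => ?_, hnd1, fun c' => ?_⟩
    · by_cases hc : c' = c
      · subst hc; exact hg1self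
      · rw [PySem.Dict.getD_insert_of_ne (k := c) (k' := c') _ _ _ hc, hg c']
        simp [List.count_cons, hc, Ne.symm hc]
    · rw [pvMem_keys_insert]
      constructor
      · rintro (rfl | hm)
        · exact List.count_pos_iff.mp (Nat.pos_of_ne_zero hcnt)
        · have := (hmem c').mp hm
          rcases List.mem_cons.mp this with rfl | hy
          · exact List.count_pos_iff.mp (Nat.pos_of_ne_zero hcnt)
          · exact hy
      · intro hm
        exact Or.inr ((hmem c').mpr (List.mem_cons_of_mem _ hm))

-- ---- the while loop reaches the least window start with ≤ k distinct chars ----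
lemma aShrink_spec (cs : List Char) (k : Int) (hk : 0 ≤ k) (m : Nat) (hm : m ≤ cs.length) :
    ∀ fuel left (t : PySem.Dict Char Int), m - left ≤ fuel → left ≤ m →
    pvDInv t (pvSeg cs left m) →
    left ≤ (aShrink cs k t left).2 ∧ (aShrink cs k t left).2 ≤ m ∧
    pvDInv (aShrink cs k t left).1 (pvSeg cs (aShrink cs k t left).2 m) ∧
    ((pvDc cs (aShrink cs k t left).2 m : Int) ≤ k) ∧
    (∀ l, left ≤ l → l < (aShrink cs k t left).2 → (pvDc cs l m : Int) > k) := by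
  intro fuel
  induction fuel with
  | zero =>
    intro left t hfuel hl hI
    have hlm : left = m := by omega
    have hseg0 : pvSeg cs left m = [] := by
      unfold pvSeg
      rw [List.drop_eq_nil_iff]
      simp only [List.length_take]
      omega
    have hsize : t.size = 0 := by
      rw [pvDInv_size t _ hI, hseg0]
      simp
    rw [aShrink]
    have hcond : ¬ ((t.size : Int) > k) := by rw [hsize]; push_cast; omega
    rw [if_neg hcond]
    refine ⟨le_refl _, hl, hI, ?_, fun l h1 h2 => absurd (lt_of_le_of_lt h1 h2) (lt_irrefl _)⟩
    have hdc : pvDc cs left m = t.size := (pvDInv_size t _ hI).symm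
    rw [hdc, hsize]
    exact_mod_cast hk
  | succ fuel ih =>
    intro left t hfuel hl hI
    rw [aShrink]
    by_cases hcond : (t.size : Int) > k
    · rw [if_pos hcond]
      have hsize : t.size = pvDc cs left m := by rw [pvDInv_size t _ hI]; rfl
      have hne : pvSeg cs left m ≠ [] := by
        intro hnil
        rw [hsize] at hcond
        unfold pvDc at hcond
        rw [hnil] at hcond
        simp at hcond
        omega
      have hlm : left < m := by
        rcases Nat.lt_or_ge left m with h | h
        · exact h
        · exfalso; apply hne
          unfold pvSeg
          rw [List.drop_eq_nil_iff]
          simp [Nat.min_eq_left hm]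
          omega
      have hget : PySem.List.pyGet? cs (left : Int) = some (cs[left]'(by omega)) := by
        rw [PySem.List.pyGet?_natCast]
        exact List.getElem?_eq_getElem (by omega)
      have hseg : pvSeg cs left m = cs[left]'(by omega) :: pvSeg cs (left+1) m :=
        pvSeg_cons cs left m hlm hm
      split
      · next h => rw [hget] at h; exact absurd h (by simp)
      · next c h =>
        rw [hget] at h
        have hc : c = cs[left]'(by omega) := by injection h with h'; exact h'.symm
        subst hc
        have hI' : pvDInv (let t1 := t.insert (cs[left]'(by omega)) (t.getD (cs[left]'(by omega)) 0 - 1);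
            if t1.getD (cs[left]'(by omega)) 0 = 0 then t1.erase (cs[left]'(by omega)) else t1)
            (pvSeg cs (left+1) m) := by
          apply pvDInv_tail
          rw [← hseg]; exact hI
        have hres := ih (left+1) _ (by omega) (by omega) hI'
        refine ⟨le_trans (Nat.le_succ left) hres.1, hres.2.1, hres.2.2.1, hres.2.2.2.1, ?_⟩
        intro l h1 h2
        rcases Nat.lt_or_ge l (left+1) with h3 | h3
        · have : l = left := by omega
          subst this
          rw [← hsize]; exact hcond
        · exact hres.2.2.2.2 l h3 h2
    · rw [if_neg hcond]
      refine ⟨le_refl _, hl, hI, ?_, fun l h1 h2 => absurd (lt_of_le_of_lt h1 h2) (lt_irrefl _)⟩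
      have : (pvDc cs left m : Int) = t.size := by rw [pvDInv_size t _ hI]; rfl
      rw [this]; omega

-- ---- B's inner loop counts the longest streak of window extensions with ≤ k distinct ----
lemma pvSet_add_toFinset (seen : PySem.Set Char) (c : Char) :
    (PySem.Set.add seen c).toFinset = insert c seen.toFinset := by
  ext x
  simp [PySem.Set.mem_add, or_comm]

lemma bInner_eq_takeWhile (k : Int) :
    ∀ (xs : List Char) (seen : PySem.Set Char), seen.Nodup →
    bInner k xs seen =
      (((List.range xs.length).takeWhile
        (fun p => ((seen.toFinset ∪ (xs.take (p+1)).toFinset).card : Int) ≤ k)).length : Int) := by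
  intro xs
  induction xs with
  | nil => intro seen _; simp [bInner]
  | cons c rest ih =>
    intro seen hnd
    have hadd : (PySem.Set.add seen c).toFinset = insert c seen.toFinset :=
      pvSet_add_toFinset seen c
    have hlen : ((PySem.Set.add seen c).length : Int) =
        ((seen.toFinset ∪ (((c :: rest).take (0+1)).toFinset)).card : Int) := by
      have hnd' : (PySem.Set.add seen c).Nodup := PySem.Set.nodup_add seen c hnd
      rw [← List.toFinset_card_of_nodup hnd', hadd]
      congr 2
      simp [Finset.union_comm]
    have hfun : ((fun p => decide ((((seen.toFinset ∪ (((c :: rest).take (p+1)).toFinset)).card : Int) ≤ k))) ∘ Nat.succ)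
        = (fun p => decide ((((PySem.Set.add seen c).toFinset ∪ ((rest.take (p+1)).toFinset)).card : Int) ≤ k)) := by
      funext p
      simp only [Function.comp]
      rw [decide_eq_decide]
      have hset : (seen.toFinset ∪ (((c :: rest).take (Nat.succ p + 1)).toFinset))
          = ((PySem.Set.add seen c).toFinset ∪ ((rest.take (p+1)).toFinset)) := by
        rw [hadd]
        ext x
        simp [List.take_succ_cons, or_comm, or_left_comm, or_assoc]
      rw [hset]
    simp only [bInner]
    by_cases hc : ((PySem.Set.add seen c).length : Int) ≤ k
    · rw [if_pos hc]
      rw [ih (PySem.Set.add seen c) (PySem.Set.nodup_add seen c hnd)]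
      have hd0 : decide ((((seen.toFinset ∪ (((c :: rest).take (0+1)).toFinset)).card : Int) ≤ k)) = true := by
        rw [decide_eq_true_eq, ← hlen]
        exact hc
      rw [List.length_cons, List.range_succ_eq_map, List.takeWhile_cons]
      simp only [hd0, if_true, List.takeWhile_map, hfun, List.length_cons, List.length_map]
      push_cast
      ring
    · rw [if_neg hc]
      have hd0 : decide ((((seen.toFinset ∪ (((c :: rest).take (0+1)).toFinset)).card : Int) ≤ k)) = false := by
        rw [decide_eq_false_iff_not, ← hlen]
        exact hc
      rw [List.length_cons, List.range_succ_eq_map, List.takeWhile_cons]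
      simp only [hd0]
      simp

lemma takeWhile_range_length :
    ∀ (n : Nat) (P : Nat → Bool) (m : Nat), (∀ p < n, P p = decide (p < m)) →
    ((List.range n).takeWhile P).length = min m n := by
  intro n
  induction n with
  | zero => intro P m _; simp
  | succ n ih =>
    intro P m h
    rw [List.range_succ_eq_map, List.takeWhile_cons]
    rcases Nat.eq_zero_or_pos m with rfl | hm
    · rw [h 0 (by omega)]
      simp
    · rw [h 0 (by omega)]
      have hd : decide (0 < m) = true := by simp [hm]
      rw [hd]
      simp only [if_pos]
      rw [List.takeWhile_map, List.length_cons, List.length_map]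
      have hrec := ih (P ∘ Nat.succ) (m - 1) (fun p hp => by
        have hstep := h (p+1) (by omega)
        simp only [Function.comp]
        rw [hstep]
        congr 1
        simp only [eq_iff_iff]
        omega)
      rw [hrec]
      omega

lemma pvBterm_eq (cs : List Char) (k : Int) (j left : Nat) (hk : 0 ≤ k) (hj : j < cs.length)
    (hl : left ≤ j + 1)
    (h1 : (pvDc cs left (j+1) : Int) ≤ k)
    (h2 : ∀ l < left, (pvDc cs l (j+1) : Int) > k) :
    pvBterm cs k j = (j : Int) - (left : Int) + 1 := by
  unfold pvBterm
  rw [bInner_eq_takeWhile k _ PySem.Set.empty (by simp [PySem.Set.empty])]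
  have hxs : ((cs.take (j+1)).reverse).length = j + 1 := by
    simp [Nat.min_eq_left (by omega : j + 1 ≤ cs.length)]
  have hkey : ∀ p < j + 1,
      (((PySem.Set.empty : PySem.Set Char).toFinset ∪
        (((cs.take (j+1)).reverse.take (p+1)).toFinset)).card : Int) = (pvDc cs (j - p) (j+1) : Int) := by
    intro p hp
    have hrev : (cs.take (j+1)).reverse.take (p+1) =
        ((cs.take (j+1)).drop ((cs.take (j+1)).length - (p+1))).reverse := by
      rw [List.take_reverse]
    have hlen' : (cs.take (j+1)).length = j + 1 := by
      simp [Nat.min_eq_left (by omega : j + 1 ≤ cs.length)]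
    have hfin : (cs.take (j+1)).reverse.take (p+1) = (pvSeg cs (j - p) (j+1)).reverse := by
      rw [hrev, hlen']
      unfold pvSeg
      congr 2
      omega
    rw [hfin]
    simp [pvDc, PySem.Set.empty]
  rw [hxs, takeWhile_range_length (j+1) _ (j + 1 - left) ?hP]
  case hP =>
    intro p hp
    rw [decide_eq_decide]
    by_cases hcase : p < j + 1 - left
    · have hle : left ≤ j - p := by omega
      have hmono : (pvDc cs (j - p) (j+1) : Int) ≤ k :=
        le_trans (by exact_mod_cast pvDc_mono_left cs left (j - p) (j+1) hle) h1
      rw [hkey p hp]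
      exact iff_of_true hmono hcase
    · have hlt : j - p < left := by omega
      have hgt : (pvDc cs (j - p) (j+1) : Int) > k := h2 _ hlt
      rw [hkey p hp]
      exact iff_of_false (by omega) hcase
  have hmin : min (j + 1 - left) (j + 1) = j + 1 - left := by omega
  rw [hmin]
  omega

-- ---- the main fold over zipIdx keeps the invariant ----
lemma foldl_zipIdx_inv {σ : Type} (cs : List Char) (F : σ → Char × Nat → σ)
    (Inv : Nat → σ → Prop)
    (hstep : ∀ i st (h : i < cs.length), Inv i st → Inv (i+1) (F st (cs[i], i))) :
    ∀ (fuel j : Nat) (st : σ), cs.length - j ≤ fuel → j ≤ cs.length → Inv j st →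
      Inv cs.length (((cs.drop j).zipIdx j).foldl F st) := by
  intro fuel
  induction fuel with
  | zero =>
    intro j st hf hj hI
    have : j = cs.length := by omega
    subst this
    simp [hI]
  | succ fuel ih =>
    intro j st hf hj hI
    rcases Nat.eq_or_lt_of_le hj with rfl | hlt
    · simp [hI]
    · rw [List.drop_eq_getElem_cons hlt, List.zipIdx_cons, List.foldl_cons]
      exact ih (j+1) _ (by omega) (by omega) (hstep j st hlt hI)

lemma pvWInv_step (cs : List Char) (k : Int) (hk : 0 ≤ k) (i : Nat)
    (st : PySem.Dict Char Int × Nat × Int) (hi : i < cs.length) (hI : pvWInv cs k i st) :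
    pvWInv cs k (i+1)
      (let t := st.1.insert cs[i] (st.1.getD cs[i] 0 + 1)
       let p := aShrink cs k t st.2.1
       (p.1, p.2, st.2.2 + ((i : Int) - (p.2 : Int) + 1))) := by
  obtain ⟨hlm, hDI, hdc, hmin, hnum⟩ := hI
  have hseg : pvSeg cs st.2.1 (i+1) = pvSeg cs st.2.1 i ++ [cs[i]] :=
    pvSeg_succ cs st.2.1 i hlm hi
  have hDI' : pvDInv (st.1.insert cs[i] (st.1.getD cs[i] 0 + 1)) (pvSeg cs st.2.1 (i+1)) := by
    rw [hseg]; exact pvDInv_append _ _ _ hDI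
  have hres := aShrink_spec cs k hk (i+1) (by omega) (i + 1 - st.2.1)
    st.2.1 _ (by omega) (by omega) hDI'
  obtain ⟨hr1, hr2, hr3, hr4, hr5⟩ := hres
  refine ⟨hr2, hr3, hr4, ?_, ?_⟩
  · intro l hlt
    rcases Nat.lt_or_ge l st.2.1 with h | h
    · have hbefore := hmin l h
      have : pvDc cs l i ≤ pvDc cs l (i+1) :=
        pvDc_mono_right cs l i (by omega) hi
      have hcast : (pvDc cs l i : Int) ≤ (pvDc cs l (i+1) : Int) := by exact_mod_cast this
      omega
    · exact hr5 l h hlt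
  · rw [hnum, List.range_succ, List.map_append, List.sum_append]
    simp only [List.map_cons, List.map_nil, List.sum_cons, List.sum_nil]
    have hterm : pvBterm cs k i = (i : Int) - ((aShrink cs k (st.1.insert cs[i] (st.1.getD cs[i] 0 + 1)) st.2.1).2 : Int) + 1 :=
      pvBterm_eq cs k i _ hk hi hr2 hr4 (fun l hl => by
        rcases Nat.lt_or_ge l st.2.1 with h | h
        · have hbefore := hmin l h
          have : pvDc cs l i ≤ pvDc cs l (i+1) :=
            pvDc_mono_right cs l i (by omega) hi
          have hcast : (pvDc cs l i : Int) ≤ (pvDc cs l (i+1) : Int) := by exact_mod_cast this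
          omega
        · exact hr5 l h hl)
    rw [hterm]
    ring

lemma alt_eq_sum (s : String) (k : Int) :
    most_k_chars_alt s k = ((List.range s.toList.length).map (pvBterm s.toList k)).sum := by
  rw [show most_k_chars_alt s k = (List.range s.toList.length).foldl
      (fun num j => num + bInner k ((s.toList.take (j+1)).reverse) PySem.Set.empty) 0 from rfl]
  rw [PySem.List.foldl_add (List.range s.toList.length)
      (fun j => bInner k ((s.toList.take (j+1)).reverse) PySem.Set.empty) 0]
  simp only [zero_add]
  rfl

-- ===== VERDICT (by name: the statement is the Claim_ definition above) =====
theorem most_k_chars_spec : Claim_equal_most_k_chars := by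
  intro s k hdom hpre
  unfold Spec_most_k_chars
  by_cases hnil : s.toList = []
  · unfold most_k_chars
    have hlen : PySem.Str.len s = 0 := by
      simp [PySem.Str.len_eq, hnil]
    rw [alt_eq_sum]
    simp [hlen, hnil]
  · have hk : 0 ≤ k := by
      rcases hpre with hk | hempty
      · exact hk
      · exfalso; apply hnil; rw [hempty]; rfl
    unfold most_k_chars
    have hlen : ¬ (PySem.Str.len s = 0) := by
      simp [PySem.Str.len_eq]
      intro hh
      apply hnil
      rw [hh]
      rfl
    simp only [hlen, if_neg, not_false_iff]
    set cs := s.toList with hcs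
    have hbase : pvWInv cs k 0 (PySem.Dict.empty, 0, 0) := by
      refine ⟨le_refl _, ?_, ?_, fun l h => absurd h (Nat.not_lt_zero l), by simp⟩
      · simpa [pvSeg] using pvDInv_empty
      · simp [pvDc, pvSeg]; exact_mod_cast hk
    have hfinal := foldl_zipIdx_inv cs
      (fun (st : PySem.Dict Char Int × Nat × Int) (ci : Char × Nat) =>
        let t := st.1.insert ci.1 (st.1.getD ci.1 0 + 1)
        let p := aShrink cs k t st.2.1
        (p.1, p.2, st.2.2 + ((ci.2 : Int) - (p.2 : Int) + 1)))
      (pvWInv cs k)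
      (fun i st h hI => pvWInv_step cs k hk i st h hI)
      cs.length 0 (PySem.Dict.empty, 0, 0) (by omega) (by omega) hbase
    rw [show cs.drop 0 = cs from rfl] at hfinal
    rw [alt_eq_sum]
    exact hfinal.2.2.2.2
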